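-- pv_equiv track=rewrite | github.com/HBinhCT/Q-project | hackerearth/Algorithms/Customer and Discount/solution.py | maxCustomers
-- ===== SOURCE A (Python) =====
-- def maxCustomers(N, M, d, arr, cost):
--     # Write your code here
--     arr.sort()
--     cost.sort()
--
--     def can_buy(x):
--         discount_left = d
--         for i in range(x):
--             using_discount = max(0, cost[i] - arr[i - x])
--             if using_discount > discount_left:
--                 return False
--             else:
--                 discount_left -= using_discount
--         return True
--
--     def get_minimum_total(x):
--         total_discount = sum(max(0, cost[i] - arr[i - x]) for i in range(x))
--         total_cost = sum(cost[:x])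
--         money_spent = total_cost - total_discount
--         return money_spent if total_discount == d else max(0, total_cost - d)
--
--     left = 0
--     right = min(N, M)
--     while right - left > 1:
--         middle = (left + right) // 2
--         if can_buy(middle):
--             left = middle
--         else:
--             right = middle - 1
--     if can_buy(right):
--         return right, get_minimum_total(right)
--     return left, get_minimum_total(left)
-- ===== SOURCE B (Python) =====
-- def maxCustomers(N, M, d, arr, cost):
--     # Linear downward scan for the largest feasible customer count instead of
--     # binary search; feasibility is checked by a single total-need sum.
--     arr.sort()
--     cost.sort()
--     n = len(arr)
--
--     def needed(x):
--         # total discount needed to serve the x cheapest costs with the x largest budgets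
--         return sum(max(0, c - a) for c, a in zip(cost[:x], arr[n - x:]))
--
--     best = min(N, M)
--     while best > 0 and needed(best) > d:
--         best -= 1
--
--     total = sum(cost[:best])
--     td = needed(best)
--     return best, (total - td if td == d else max(0, total - d))
-- ===== Notes on version B (the rewrite author's own statement) =====
-- stated objective: simpler
-- what changed: Replaces the binary search plus prefix-cutoff can_buy with a single downward linear scan that tests feasibility by one total-need sum (feasibility is monotone, so the first feasible x from the top is the answer), reusing that sum for the final cost.
-- outside the precondition, e.g. on maxCustomers(5, 5, 100, [1, 2], [3, 4]): A raises IndexError, B returns (5, 0); on maxCustomers(10, 8, 2, [-1, 6, -1, 0, 2], [139, -1]): A returns (1, 0), B returns (6, 136); on maxCustomers(3, 3, 0, [0, 0, 0], [10, 10]): A returns (0, 0), B returns (0, 0)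
import Mathlib
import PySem

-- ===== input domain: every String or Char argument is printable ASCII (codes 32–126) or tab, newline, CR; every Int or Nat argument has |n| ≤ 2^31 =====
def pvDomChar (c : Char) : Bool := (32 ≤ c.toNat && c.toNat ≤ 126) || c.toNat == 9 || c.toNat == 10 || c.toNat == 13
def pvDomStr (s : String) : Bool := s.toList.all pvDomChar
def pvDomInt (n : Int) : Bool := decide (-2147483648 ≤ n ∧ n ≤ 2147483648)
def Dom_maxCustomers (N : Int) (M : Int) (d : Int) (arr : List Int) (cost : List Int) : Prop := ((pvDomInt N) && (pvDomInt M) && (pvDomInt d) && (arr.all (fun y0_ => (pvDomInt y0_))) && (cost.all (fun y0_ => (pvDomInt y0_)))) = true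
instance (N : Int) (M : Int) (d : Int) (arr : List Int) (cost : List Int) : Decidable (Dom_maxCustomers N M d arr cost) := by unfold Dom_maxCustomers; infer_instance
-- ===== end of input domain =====

-- B replaces A's binary search (with its prefix-cutoff can_buy) by a downward linear scan using one
-- total-need sum per candidate; proved to return the same pair. Both A and B sort arr and cost in
-- place in Python; the equivalence proved here is about the return value.

-- ===== PORT A =====
-- the body of can_buy's for-loop over range(x), with discount_left as state and early return False
def pvCanBuyGo (sc sa : List Int) (x : Int) : Int → List Int → Bool
  | _, [] => true
  | dl, i :: rest =>
    let u := max 0 (PySem.List.pyGetD sc i 0 - PySem.List.pyGetD sa (i - x) 0)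
    if u > dl then false else pvCanBuyGo sc sa x (dl - u) rest

def pvCanBuy (sc sa : List Int) (d x : Int) : Bool :=
  pvCanBuyGo sc sa x d (PySem.List.pyRange 0 x)

def pvGetMinTotal (sc sa : List Int) (d x : Int) : Int :=
  let totalDiscount := ((PySem.List.pyRange 0 x).map
      (fun i => max 0 (PySem.List.pyGetD sc i 0 - PySem.List.pyGetD sa (i - x) 0))).sum
  let totalCost := (PySem.List.slice sc none (some x)).sum
  let moneySpent := totalCost - totalDiscount
  if totalDiscount = d then moneySpent else max 0 (totalCost - d)

-- the while-loop of the binary search; ends with A's final if/return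
def pvBSearch (sc sa : List Int) (d left right : Int) : Int × Int :=
  if right - left > 1 then
    let middle := PySem.Int.floordiv (left + right) 2
    if pvCanBuy sc sa d middle then pvBSearch sc sa d middle right
    else pvBSearch sc sa d left (middle - 1)
  else if pvCanBuy sc sa d right then (right, pvGetMinTotal sc sa d right)
  else (left, pvGetMinTotal sc sa d left)
termination_by (right - left).toNat
decreasing_by
  · rw [PySem.Int.floordiv_eq_ediv_of_pos (by omega)] at *; omega
  · rw [PySem.Int.floordiv_eq_ediv_of_pos (by omega)] at *; omega

def maxCustomers (N : Int) (M : Int) (d : Int) (arr : List Int) (cost : List Int) : Int × Int :=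
  let sa := PySem.List.sorted arr (fun v => v)
  let sc := PySem.List.sorted cost (fun v => v)
  pvBSearch sc sa d 0 (min N M)

-- ===== PORT B =====
-- needed(x) = sum(max(0, c - a) for c, a in zip(cost[:x], arr[n - x:]))
def pvNeeded (sc sa : List Int) (x : Int) : Int :=
  (((PySem.List.slice sc none (some x)).zip
      (PySem.List.slice sa (some ((sa.length : Int) - x)) none)).map
    (fun p => max 0 (p.1 - p.2))).sum

-- while best > 0 and needed(best) > d: best -= 1
def pvScan (sc sa : List Int) (d best : Int) : Int :=
  if best > 0 ∧ pvNeeded sc sa best > d then pvScan sc sa d (best - 1) else best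
termination_by best.toNat
decreasing_by omega

def maxCustomers_alt (N : Int) (M : Int) (d : Int) (arr : List Int) (cost : List Int) : Int × Int :=
  let sa := PySem.List.sorted arr (fun v => v)
  let sc := PySem.List.sorted cost (fun v => v)
  let best := pvScan sc sa d (min N M)
  let total := (PySem.List.slice sc none (some best)).sum
  let td := pvNeeded sc sa best
  (best, if td = d then total - td else max 0 (total - d))

-- ===== PRECONDITION & SPEC =====
-- Pre_ excludes inputs where min(N, M) exceeds a list length: there A's cost[i] / arr[i - x]
-- accesses generally raise IndexError (A occasionally returns when can_buy fails before the
-- out-of-range access; such inputs are excluded all the same).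
def Pre_maxCustomers (N : Int) (M : Int) (d : Int) (arr : List Int) (cost : List Int) : Prop :=
  min N M ≤ (arr.length : Int) ∧ min N M ≤ (cost.length : Int)
instance (N : Int) (M : Int) (d : Int) (arr : List Int) (cost : List Int) : Decidable (Pre_maxCustomers N M d arr cost) := by unfold Pre_maxCustomers; infer_instance

def pvWitness_maxCustomers : Int × Int × Int × List Int × List Int := (2, 2, 3, [2, 1], [4, 2])

def Spec_maxCustomers (N : Int) (M : Int) (d : Int) (arr : List Int) (cost : List Int) (out : Int × Int) : Prop := out = maxCustomers_alt N M d arr cost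
instance (N : Int) (M : Int) (d : Int) (arr : List Int) (cost : List Int) (out : Int × Int) : Decidable (Spec_maxCustomers N M d arr cost out) := by unfold Spec_maxCustomers; infer_instance

-- ===== CLAIM (what is proved, stated in full; the proofs are below) =====
def Claim_equal_maxCustomers : Prop := ∀ (N : Int) (M : Int) (d : Int) (arr : List Int) (cost : List Int), Dom_maxCustomers N M d arr cost → Pre_maxCustomers N M d arr cost → Spec_maxCustomers N M d arr cost (maxCustomers N M d arr cost)

-- ===== LEMMAS AND PROOFS =====

-- the i-th term of A's discount sums
def pvTerm (sc sa : List Int) (x i : Int) : Int :=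
  max 0 (PySem.List.pyGetD sc i 0 - PySem.List.pyGetD sa (i - x) 0)

theorem pvTerm_nonneg (sc sa : List Int) (x i : Int) : 0 ≤ pvTerm sc sa x i := le_max_left _ _

-- can_buy's early-exit loop computes 'total needed ≤ budget' (or the index list is empty)
theorem pvCanBuyGo_cons (sc sa : List Int) (x dl i : Int) (rest : List Int) :
    pvCanBuyGo sc sa x dl (i :: rest) =
      if pvTerm sc sa x i > dl then false else pvCanBuyGo sc sa x (dl - pvTerm sc sa x i) rest := rfl

theorem pvCanBuyGo_iff (sc sa : List Int) (x : Int) (is : List Int) (dl : Int) :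
    pvCanBuyGo sc sa x dl is = true ↔ (is = [] ∨ (is.map (pvTerm sc sa x)).sum ≤ dl) := by
  induction is generalizing dl with
  | nil => simp [pvCanBuyGo]
  | cons i rest ih =>
    have hnn : 0 ≤ (rest.map (pvTerm sc sa x)).sum :=
      List.sum_nonneg (by intro y hy; obtain ⟨j, _, rfl⟩ := List.mem_map.mp hy; exact pvTerm_nonneg ..)
    have ht := pvTerm_nonneg sc sa x i
    rw [pvCanBuyGo_cons]
    split_ifs with h
    · simp only [List.map_cons, List.sum_cons]
      constructor
      · intro hc; cases hc
      · rintro (hc | hc)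
        · cases hc
        · exact absurd hc (by omega)
    · rw [ih]
      simp only [List.map_cons, List.sum_cons]
      constructor
      · rintro (rfl | hc)
        · right; simp only [List.map_nil, List.sum_nil] at *; omega
        · right; omega
      · rintro (hc | hc)
        · cases hc
        · right; omega

theorem pvCanBuy_iff (sc sa : List Int) (d x : Int) :
    pvCanBuy sc sa d x = true ↔ (x ≤ 0 ∨ ((PySem.List.pyRange 0 x).map (pvTerm sc sa x)).sum ≤ d) := by
  rw [pvCanBuy, pvCanBuyGo_iff]
  have h : PySem.List.pyRange 0 x = [] ↔ x ≤ 0 := by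
    constructor
    · intro he
      by_contra hx
      have := PySem.List.length_pyRange_one 0 x
      rw [he] at this
      simp at this
      omega
    · exact fun hx => PySem.List.pyRange_one_eq_nil (by omega)
  rw [h]

-- common normal form of both discount sums, indexed over List.range
def pvS (sc sa : List Int) (t : Nat) : Int :=
  ((List.range t).map (fun k => max 0 (sc.getD k 0 - sa.getD (sa.length - t + k) 0))).sum

theorem pvRangeSum_eq_S (sc sa : List Int) (x : Int) (hx0 : 0 ≤ x)
    (hxn : x ≤ (sa.length : Int)) (hxm : x ≤ (sc.length : Int)) :
    ((PySem.List.pyRange 0 x).map (pvTerm sc sa x)).sum = pvS sc sa x.toNat := by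
  rw [PySem.List.pyRange_one, List.map_map, pvS]
  simp only [Int.sub_zero]
  congr 1
  apply List.map_congr_left
  intro k hk
  have hk' : k < x.toNat := by simpa using hk
  have hkx : (k : Int) < x := by omega
  simp only [Function.comp_apply, zero_add, pvTerm]
  have h1 : PySem.List.pyGetD sc (k : Int) 0 = sc.getD k 0 := PySem.List.pyGetD_natCast ..
  have h2 : PySem.List.pyGetD sa ((k : Int) - x) 0 = sa.getD (sa.length - x.toNat + k) 0 := by
    have he : (k : Int) - x = -((x.toNat - k : Nat) : Int) := by omega
    have hlt : x.toNat - k ≤ sa.length := by omega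
    rw [he, PySem.List.pyGetD_neg_natCast sa (x.toNat - k) 0 (by omega) hlt,
      List.getD_eq_getElem sa 0 (by omega)]
    congr 1
    omega
  rw [h1, h2]

theorem pvNeeded_eq_S (sc sa : List Int) (x : Int) (hx0 : 0 ≤ x)
    (hxn : x ≤ (sa.length : Int)) (hxm : x ≤ (sc.length : Int)) :
    pvNeeded sc sa x = pvS sc sa x.toNat := by
  rw [pvNeeded, PySem.List.slice_to sc hx0, PySem.List.slice_from sa (by omega)]
  have hzip : (List.take x.toNat sc).zip (List.drop ((sa.length : Int) - x).toNat sa) =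
      (List.range x.toNat).map (fun k => (sc.getD k 0, sa.getD (sa.length - x.toNat + k) 0)) := by
    apply List.ext_getElem
    · simp
      omega
    · intro j h1 h2
      have hj : j < x.toNat := by simp at h1; omega
      have hjm : j < sc.length := by omega
      have hja : ((sa.length : Int) - x).toNat + j < sa.length := by omega
      simp only [List.getElem_zip, List.getElem_take, List.getElem_drop, List.getElem_map,
        List.getElem_range]
      rw [List.getD_eq_getElem sc 0 hjm, List.getD_eq_getElem sa 0 (by omega)]
      have hidx : ((sa.length : Int) - x).toNat + j = sa.length - x.toNat + j := by omega
      simp only [hidx]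
  rw [hzip, List.map_map, pvS]
  congr 1

-- A's range-indexed sum equals B's zip-of-slices sum, for 0 ≤ x within both lengths
theorem pvNeeded_eq (sc sa : List Int) (x : Int) (hx0 : 0 ≤ x)
    (hxn : x ≤ (sa.length : Int)) (hxm : x ≤ (sc.length : Int)) :
    ((PySem.List.pyRange 0 x).map (pvTerm sc sa x)).sum = pvNeeded sc sa x := by
  rw [pvRangeSum_eq_S sc sa x hx0 hxn hxm, pvNeeded_eq_S sc sa x hx0 hxn hxm]

-- needed is monotone in x (uses that sa is sorted ascending)
theorem pvNeeded_mono (sc sa : List Int) (x y : Int)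
    (hsa : ∀ p q : Nat, p ≤ q → q < sa.length → sa.getD p 0 ≤ sa.getD q 0)
    (h0 : 0 ≤ x) (hxy : x ≤ y) (hyn : y ≤ (sa.length : Int)) (hym : y ≤ (sc.length : Int)) :
    pvNeeded sc sa x ≤ pvNeeded sc sa y := by
  rw [pvNeeded_eq_S sc sa x h0 (by omega) (by omega), pvNeeded_eq_S sc sa y (by omega) hyn hym]
  have key : ∀ t : Nat, t ≤ sa.length → t ≤ sc.length → ∀ s : Nat, s ≤ t →
      pvS sc sa s ≤ pvS sc sa t := by
    intro t
    induction t with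
    | zero =>
      intro _ _ s hs
      have hs0 : s = 0 := Nat.le_zero.mp hs
      rw [hs0]
    | succ t ih =>
      intro htn htm s hs
      rcases Nat.eq_or_lt_of_le hs with rfl | hlt
      · exact le_refl _
      · refine le_trans (ih (by omega) (by omega) s (by omega)) ?_
        -- pvS t ≤ pvS (t+1)
        rw [pvS, pvS, List.range_succ, List.map_append, List.sum_append]
        have hstep : ((List.range t).map
            (fun k => max 0 (sc.getD k 0 - sa.getD (sa.length - t + k) 0))).sum ≤
            ((List.range t).map
            (fun k => max 0 (sc.getD k 0 - sa.getD (sa.length - (t + 1) + k) 0))).sum := by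
          apply List.sum_le_sum
          intro k hk
          have hk' : k < t := by simpa using hk
          have hle := hsa (sa.length - (t + 1) + k) (sa.length - t + k) (by omega) (by omega)
          omega
        have hlast : 0 ≤ ((fun k => max 0 (sc.getD k 0 - sa.getD (sa.length - (t + 1) + k) 0)) t) := le_max_left _ _
        simp only [List.map_cons, List.map_nil, List.sum_cons, List.sum_nil] at *
        omega
  exact key y.toNat (by omega) (by omega) x.toNat (by omega)

theorem pvScan_spec (sc sa : List Int) (d b : Int) (hb : 0 ≤ b) :
    0 ≤ pvScan sc sa d b ∧ pvScan sc sa d b ≤ b ∧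
      (pvScan sc sa d b ≤ 0 ∨ pvNeeded sc sa (pvScan sc sa d b) ≤ d) ∧
      (∀ y, pvScan sc sa d b < y → y ≤ b → pvNeeded sc sa y > d) := by
  fun_induction pvScan sc sa d b with
  | case1 b hcond ih =>
    obtain ⟨hr0, hrb, hfe, hmax⟩ := ih (by omega)
    refine ⟨hr0, by omega, hfe, ?_⟩
    intro y hy1 hy2
    rcases lt_or_ge y b with h | h
    · exact hmax y hy1 (by omega)
    · have : y = b := by omega
      subst this
      exact hcond.2
  | case2 b hcond =>
    refine ⟨hb, le_refl _, by omega, ?_⟩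
    intro y hy1 hy2
    omega

theorem pvBSearch_spec (sc sa : List Int) (d K l r : Int)
    (hmono : ∀ x y : Int, 0 ≤ x → x ≤ y → y ≤ K →
      (y ≤ 0 ∨ pvNeeded sc sa y ≤ d) → (x ≤ 0 ∨ pvNeeded sc sa x ≤ d))
    (hKn : K ≤ (sa.length : Int)) (hKm : K ≤ (sc.length : Int))
    (hl0 : 0 ≤ l) (hlr : l ≤ r) (hrK : r ≤ K)
    (hPl : l ≤ 0 ∨ pvNeeded sc sa l ≤ d)
    (habove : ∀ y, r < y → y ≤ K → ¬(y ≤ 0 ∨ pvNeeded sc sa y ≤ d)) :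
    ∃ ρ, pvBSearch sc sa d l r = (ρ, pvGetMinTotal sc sa d ρ) ∧ 0 ≤ ρ ∧ ρ ≤ r ∧
      (ρ ≤ 0 ∨ pvNeeded sc sa ρ ≤ d) ∧ (∀ y, ρ < y → y ≤ K → ¬(y ≤ 0 ∨ pvNeeded sc sa y ≤ d)) := by
  have hchar : ∀ x : Int, 0 ≤ x → x ≤ K →
      (pvCanBuy sc sa d x = true ↔ (x ≤ 0 ∨ pvNeeded sc sa x ≤ d)) := by
    intro x h1 h2
    rw [pvCanBuy_iff, pvNeeded_eq sc sa x h1 (by omega) (by omega)]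
  fun_induction pvBSearch sc sa d l r with
  | case1 l r hcond middle hcb ih =>
    have hmid : middle = (l + r) / 2 := PySem.Int.floordiv_eq_ediv_of_pos (by omega)
    have hm1 : l + 1 ≤ middle := by omega
    have hm2 : middle ≤ r - 1 := by omega
    have hPmid := (hchar _ (by omega) (by omega)).mp hcb
    exact ih (by omega) (by omega) hrK hPmid habove
  | case2 l r hcond middle hcb ih =>
    have hmid : middle = (l + r) / 2 := PySem.Int.floordiv_eq_ediv_of_pos (by omega)
    have hm1 : l + 1 ≤ middle := by omega
    have hm2 : middle ≤ r - 1 := by omega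
    have hnPmid : ¬(middle ≤ 0 ∨ pvNeeded sc sa middle ≤ d) := by
      intro hP
      exact absurd ((hchar _ (by omega) (by omega)).mpr hP) (by simpa using hcb)
    have haboveK : ∀ y, middle - 1 < y → y ≤ K → ¬(y ≤ 0 ∨ pvNeeded sc sa y ≤ d) := by
      intro y hy1 hy2 hPy
      exact hnPmid (hmono _ y (by omega) (by omega) hy2 hPy)
    obtain ⟨ρ, heq, h1, h2, h3, h4⟩ := ih hl0 (by omega) (by omega) hPl haboveK
    exact ⟨ρ, heq, h1, by omega, h3, h4⟩
  | case3 l r hcond hcb =>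
    have hPr := (hchar r (by omega) hrK).mp hcb
    exact ⟨r, rfl, by omega, le_refl _, hPr, habove⟩
  | case4 l r hcond hcb =>
    have hnPr : ¬(r ≤ 0 ∨ pvNeeded sc sa r ≤ d) := by
      intro hP
      exact absurd ((hchar r (by omega) hrK).mpr hP) (by simpa using hcb)
    refine ⟨l, rfl, hl0, by omega, hPl, ?_⟩
    intro y hy1 hy2 hPy
    rcases lt_or_ge y r with h | h
    · omega
    · rcases eq_or_lt_of_le h with h' | h'
      · rw [h'] at hnPr; exact hnPr hPy
      · exact habove y (by omega) hy2 hPy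


theorem pvGetMinTotal_eq (sc sa : List Int) (d x : Int) (hx0 : 0 ≤ x)
    (hxn : x ≤ (sa.length : Int)) (hxm : x ≤ (sc.length : Int)) :
    pvGetMinTotal sc sa d x =
      (if pvNeeded sc sa x = d then (PySem.List.slice sc none (some x)).sum - pvNeeded sc sa x
       else max 0 ((PySem.List.slice sc none (some x)).sum - d)) := by
  have h : (List.map (fun i => max 0 (PySem.List.pyGetD sc i 0 - PySem.List.pyGetD sa (i - x) 0))
      (PySem.List.pyRange 0 x)).sum = pvNeeded sc sa x := pvNeeded_eq sc sa x hx0 hxn hxm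
  rw [pvGetMinTotal, h]

-- ===== VERDICT (by name: the statement is the Claim_ definition above) =====
theorem maxCustomers_spec : Claim_equal_maxCustomers := by
  intro N M d arr cost _hdom hpre
  obtain ⟨hpn, hpm⟩ := hpre
  simp only [Spec_maxCustomers, maxCustomers, maxCustomers_alt]
  have hlen_a : (PySem.List.sorted arr (fun v => v)).length = arr.length :=
    PySem.List.length_sorted ..
  have hlen_c : (PySem.List.sorted cost (fun v => v)).length = cost.length :=
    PySem.List.length_sorted ..
  set sa := PySem.List.sorted arr (fun v => v) with hsa_def
  set sc := PySem.List.sorted cost (fun v => v) with hsc_def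
  set K := min N M with hK_def
  have hKn : K ≤ (sa.length : Int) := by rw [hlen_a]; exact hpn
  have hKm : K ≤ (sc.length : Int) := by rw [hlen_c]; exact hpm
  rcases le_or_gt 0 K with hK | hK
  · -- 0 ≤ min N M : both sides compute the maximal feasible count
    have hmono_getD : ∀ p q : Nat, p ≤ q → q < sa.length → sa.getD p 0 ≤ sa.getD q 0 := by
      intro p q hpq hq
      rw [List.getD_eq_getElem sa 0 (by omega), List.getD_eq_getElem sa 0 hq]
      exact PySem.List.sorted_id_getElem_mono arr hpq hq
    have hmono : ∀ x y : Int, 0 ≤ x → x ≤ y → y ≤ K →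
        (y ≤ 0 ∨ pvNeeded sc sa y ≤ d) → (x ≤ 0 ∨ pvNeeded sc sa x ≤ d) := by
      intro x y hx hxy hyK hPy
      by_cases hx0 : x ≤ 0
      · exact Or.inl hx0
      · rcases hPy with hy0 | hyd
        · omega
        · exact Or.inr (le_trans
            (pvNeeded_mono sc sa x y hmono_getD hx hxy (by omega) (by omega)) hyd)
    obtain ⟨hs0, hsb, hsf, hsmax⟩ := pvScan_spec sc sa d K hK
    obtain ⟨ρ, heq, hρ0, hρK, hρP, hρmax⟩ :=
      pvBSearch_spec sc sa d K 0 K hmono hKn hKm le_rfl hK le_rfl (Or.inl le_rfl)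
        (by intro y h1 h2; omega)
    have hEq : ρ = pvScan sc sa d K := by
      by_contra hne
      rcases lt_or_gt_of_ne hne with h | h
      · exact hρmax (pvScan sc sa d K) h (by omega) hsf
      · have hgt := hsmax ρ h hρK
        rcases hρP with h0 | hf <;> omega
    rw [heq, hEq, pvGetMinTotal_eq sc sa d _ (by omega) (by omega) (by omega)]
  · -- min N M < 0 : the loop bodies never run; both return (K, money for K)
    have hA : pvBSearch sc sa d 0 K = (K, pvGetMinTotal sc sa d K) := by
      rw [pvBSearch]
      have hc1 : ¬(K - 0 > 1) := by omega
      have hcb : pvCanBuy sc sa d K = true := (pvCanBuy_iff sc sa d K).mpr (Or.inl (by omega))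
      rw [if_neg hc1, if_pos hcb]
    have hB : pvScan sc sa d K = K := by
      rw [pvScan]
      have h2 : ¬(K > 0 ∧ pvNeeded sc sa K > d) := by
        intro h; omega
      rw [if_neg h2]
    have hneed0 : pvNeeded sc sa K = 0 := by
      rw [pvNeeded, PySem.List.slice_from sa (by omega)]
      rw [List.drop_eq_nil_of_le (by omega)]
      simp
    have hdisc0 : pvGetMinTotal sc sa d K =
        (if (0 : Int) = d then (PySem.List.slice sc none (some K)).sum - 0
         else max 0 ((PySem.List.slice sc none (some K)).sum - d)) := by
      rw [pvGetMinTotal, PySem.List.pyRange_one_eq_nil (by omega : K ≤ 0)]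
      simp
    rw [hA, hB, hneed0, hdisc0]
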